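-- pv_equiv track=rewrite | github.com/radoslava02/diplomna | Simplex method - universal code - second version. py.py | find_basis
-- ===== SOURCE A (Python) =====
-- def find_basis(constraints):
--     """Намира базисните променливи в ограниченията."""
--     num_constraints = len(constraints)
--     num_vars = len(constraints[0][0]) if constraints else 0
--     basis_vars = [-1] * num_constraints  # Индексите на базисните променливи
--
--     for j in range(num_vars):
--         count = 0
--         row_index = -1
--         for i in range(num_constraints):
--             if constraints[i][0][j] == 1:
--                 count += 1
--                 row_index = i
--             elif constraints[i][0][j] != 0:
--                 count = -1  # Ако има друга ненулева стойност, не е базис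
--                 break
--         if count == 1:
--             basis_vars[row_index] = j
--
--     return basis_vars
-- ===== SOURCE B (Python) =====
-- def find_basis(constraints):
--     """Row-major single pass: per-column ones-count, last-one row, and a
--     disqualified flag, then one sweep over columns to place basis variables."""
--     num_constraints = len(constraints)
--     num_vars = len(constraints[0][0]) if constraints else 0
--     ones = [0] * num_vars
--     last = [-1] * num_vars
--     bad = [False] * num_vars
--     for i, c in enumerate(constraints):
--         for j in range(num_vars):
--             v = c[0][j]
--             if v == 1:
--                 ones[j] += 1
--                 last[j] = i
--             elif v != 0:
--                 bad[j] = True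
--     basis_vars = [-1] * num_constraints
--     for j in range(num_vars):
--         if not bad[j] and ones[j] == 1:
--             basis_vars[last[j]] = j
--     return basis_vars
-- ===== Notes on version B (the rewrite author's own statement) =====
-- stated objective: alternative
-- what changed: Replaces A's column-outer/row-inner scan with early break by a single row-major pass filling per-column tables (ones-count, last-one row, disqualified flag) followed by one sweep over the columns.
-- outside the precondition, e.g. on find_basis([[[2, 5]], [[2]]]): A returns [-1, -1], B raises IndexError
import Mathlib
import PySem

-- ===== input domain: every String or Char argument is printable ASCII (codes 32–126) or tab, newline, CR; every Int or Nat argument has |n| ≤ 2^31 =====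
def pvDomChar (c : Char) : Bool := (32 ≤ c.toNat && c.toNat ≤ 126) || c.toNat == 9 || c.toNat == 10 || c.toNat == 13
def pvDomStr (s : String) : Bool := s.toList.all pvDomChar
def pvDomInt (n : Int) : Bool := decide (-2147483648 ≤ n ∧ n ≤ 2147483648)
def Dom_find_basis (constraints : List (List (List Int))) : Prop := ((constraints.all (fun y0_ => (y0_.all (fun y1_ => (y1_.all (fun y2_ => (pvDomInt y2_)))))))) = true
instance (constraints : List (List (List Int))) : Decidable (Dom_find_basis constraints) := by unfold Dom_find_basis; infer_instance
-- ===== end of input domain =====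

-- B replaces A's column-outer/row-inner scan (with early break) by one row-major pass filling
-- per-column tables (ones-count, last-one row, disqualified flag) plus a final sweep over columns;
-- same cost, different traversal order and state (objective: alternative).

-- ===== PORT A =====
-- inner loop 'for i in range(num_constraints)' of A, transcribed as structural recursion over the
-- remaining rows with the running row index i; the early 'break' is the non-recursive branch.
-- 'constraints[i][0][j]' is read as ((r.headD []).pyGet? j).getD 0: inside Pre_ every such access
-- is in range, so headD/getD defaults are never consulted.
def pvScanCol : List (List (List Int)) → Nat → Int → Int → Int → Int × Int
  | [], _, _, count, rowIndex => (count, rowIndex)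
  | r :: rest, j, i, count, rowIndex =>
    let v := (PySem.List.pyGet? (r.headD []) (j : Int)).getD 0
    if v = 1 then pvScanCol rest j (i + 1) (count + 1) i
    else if v ≠ 0 then (-1, rowIndex)
    else pvScanCol rest j (i + 1) count rowIndex

def find_basis (constraints : List (List (List Int))) : List Int :=
  let num_constraints := constraints.length
  let num_vars := if constraints ≠ [] then ((constraints.headD []).headD []).length else 0
  (List.range num_vars).foldl
    (fun basis_vars j =>
      let cr := pvScanCol constraints j 0 0 (-1)
      if cr.1 = 1 then basis_vars.set cr.2.toNat (j : Int) else basis_vars)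
    (List.replicate num_constraints (-1))

-- ===== PORT B =====
-- one inner step of B's row-major pass: update the three per-column tables at column j for row c
-- (row index i); 'c[0][j]' read as in port A.
def pvUpd (i : Int) (c : List (List Int)) (tabs : List Int × List Int × List Bool) (j : Nat) :
    List Int × List Int × List Bool :=
  let v := (PySem.List.pyGet? (c.headD []) (j : Int)).getD 0
  let (ones, last, bad) := tabs
  if v = 1 then (ones.set j (ones.getD j 0 + 1), last.set j i, bad)
  else if v ≠ 0 then (ones, last, bad.set j true)
  else tabs

def find_basis_alt (constraints : List (List (List Int))) : List Int :=
  let num_constraints := constraints.length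
  let num_vars := if constraints ≠ [] then ((constraints.headD []).headD []).length else 0
  let tabs :=
    (PySem.List.enumerate constraints).foldl
      (fun tabs ic => (List.range num_vars).foldl (pvUpd ic.1 ic.2) tabs)
      (List.replicate num_vars 0, List.replicate num_vars (-1), List.replicate num_vars false)
  (List.range num_vars).foldl
    (fun basis_vars j =>
      if tabs.2.2.getD j false = false ∧ tabs.1.getD j 0 = 1
      then basis_vars.set (tabs.2.1.getD j (-1)).toNat (j : Int) else basis_vars)
    (List.replicate num_constraints (-1))

-- ===== PRECONDITION & SPEC =====
-- Pre_ excludes exactly the inputs where Python A raises IndexError (constraints[0] empty, or —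
-- when num_vars > 0 — some constraints[i] empty or constraints[i][0] shorter than num_vars) plus
-- the ragged inputs where A only returns because its early 'break' on a non-0/1 value happens to
-- shield every short row from being indexed; on those B naturally raises IndexError too.
def Pre_find_basis (constraints : List (List (List Int))) : Prop :=
  constraints = [] ∨
    (constraints.headD [] ≠ [] ∧
      (((constraints.headD []).headD []).length = 0 ∨
        ∀ r ∈ constraints,
          r ≠ [] ∧ ((constraints.headD []).headD []).length ≤ (r.headD []).length))
instance (constraints : List (List (List Int))) : Decidable (Pre_find_basis constraints) := by
  unfold Pre_find_basis; infer_instance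

def pvWitness_find_basis : List (List (List Int)) := [[[1, 0, 2]], [[0, 1, 0]]]

def Spec_find_basis (constraints : List (List (List Int))) (out : List Int) : Prop :=
  out = find_basis_alt constraints
instance (constraints : List (List (List Int))) (out : List Int) :
    Decidable (Spec_find_basis constraints out) := by unfold Spec_find_basis; infer_instance

-- ===== CLAIM (what is proved, stated in full; the proofs are below) =====
def Claim_equal_find_basis : Prop :=
  ∀ (constraints : List (List (List Int))), Dom_find_basis constraints →
    Pre_find_basis constraints → Spec_find_basis constraints (find_basis constraints)

-- ===== LEMMAS AND PROOFS =====

-- the value Python reads as constraints[i][0][j]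
def pvColVal (r : List (List Int)) (j : Nat) : Int := (PySem.List.pyGet? (r.headD []) (j : Int)).getD 0

-- one abstract per-column step: (ones, last, bad) after seeing value v in row i
def pvStepC (i : Int) (v : Int) (s : Int × Int × Bool) : Int × Int × Bool :=
  if v = 1 then (s.1 + 1, i, s.2.2) else if v ≠ 0 then (s.1, s.2.1, true) else s

-- per-column summary of a block of rows starting at row index i
def pvColSum : List (List (List Int)) → Nat → Int → (Int × Int × Bool) → Int × Int × Bool
  | [], _, _, s => s
  | r :: rest, j, i, s => pvColSum rest j (i + 1) (pvStepC i (pvColVal r j) s)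

-- the per-column view of B's table triple
def pvGetT (t : List Int × List Int × List Bool) (j : Nat) : Int × Int × Bool :=
  (t.1.getD j 0, t.2.1.getD j (-1), t.2.2.getD j false)

def pvLenT (t : List Int × List Int × List Bool) (nv : Nat) : Prop :=
  t.1.length = nv ∧ t.2.1.length = nv ∧ t.2.2.length = nv

-- ===== A-side characterisation =====
lemma scan_cons (r : List (List Int)) (rest : List (List (List Int))) (j : Nat)
    (i count rowIndex : Int) :
    pvScanCol (r :: rest) j i count rowIndex =
      (if pvColVal r j = 1 then pvScanCol rest j (i + 1) (count + 1) i
       else if pvColVal r j ≠ 0 then (-1, rowIndex)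
       else pvScanCol rest j (i + 1) count rowIndex) := rfl

lemma colSum_cons (r : List (List Int)) (rest : List (List (List Int))) (j : Nat) (i : Int)
    (s : Int × Int × Bool) :
    pvColSum (r :: rest) j i s = pvColSum rest j (i + 1) (pvStepC i (pvColVal r j) s) := rfl

lemma colSum_bad_mono : ∀ (rows : List (List (List Int))) (j : Nat) (i : Int)
    (st : Int × Int × Bool), st.2.2 = true → (pvColSum rows j i st).2.2 = true := by
  intro rows
  induction rows with
  | nil => intro j i st h; simpa [pvColSum] using h
  | cons r rest ih =>
    intro j i st h
    rw [colSum_cons]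
    exact ih j (i + 1) _ (by simp only [pvStepC]; split_ifs <;> simp_all)

lemma scan_clean : ∀ (rows : List (List (List Int))) (j : Nat) (i count rowIndex : Int),
    (pvColSum rows j i (count, rowIndex, false)).2.2 = false →
    pvScanCol rows j i count rowIndex =
      ((pvColSum rows j i (count, rowIndex, false)).1,
       (pvColSum rows j i (count, rowIndex, false)).2.1) := by
  intro rows
  induction rows with
  | nil => intro j i count rowIndex _; simp [pvScanCol, pvColSum]
  | cons r rest ih =>
    intro j i count rowIndex h
    rw [colSum_cons] at h ⊢
    rw [scan_cons]
    by_cases h1 : pvColVal r j = 1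
    · rw [if_pos h1]
      simp only [pvStepC, if_pos h1] at h ⊢
      exact ih j (i + 1) (count + 1) i h
    · by_cases h0 : pvColVal r j = 0
      · rw [if_neg h1, if_neg (show ¬(pvColVal r j ≠ 0) by simp [h0])]
        simp only [pvStepC, if_neg h1] at h ⊢
        rw [if_neg (show ¬(pvColVal r j ≠ 0) by simp [h0])] at h ⊢
        exact ih j (i + 1) count rowIndex h
      · exfalso
        simp only [pvStepC, if_neg h1] at h
        rw [if_pos (show pvColVal r j ≠ 0 from h0)] at h
        rw [colSum_bad_mono rest j (i + 1) _ rfl] at h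
        simp at h

lemma scan_bad : ∀ (rows : List (List (List Int))) (j : Nat) (i count rowIndex : Int),
    (pvColSum rows j i (count, rowIndex, false)).2.2 = true →
    (pvScanCol rows j i count rowIndex).1 = -1 := by
  intro rows
  induction rows with
  | nil => intro j i count rowIndex h; simp [pvColSum] at h
  | cons r rest ih =>
    intro j i count rowIndex h
    rw [colSum_cons] at h
    rw [scan_cons]
    by_cases h1 : pvColVal r j = 1
    · rw [if_pos h1]
      simp only [pvStepC, if_pos h1] at h
      exact ih j (i + 1) (count + 1) i h
    · by_cases h0 : pvColVal r j = 0
      · rw [if_neg h1, if_neg (show ¬(pvColVal r j ≠ 0) by simp [h0])]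
        simp only [pvStepC, if_neg h1] at h
        rw [if_neg (show ¬(pvColVal r j ≠ 0) by simp [h0])] at h
        exact ih j (i + 1) count rowIndex h
      · rw [if_neg h1, if_pos (show pvColVal r j ≠ 0 from h0)]

-- ===== B-side characterisation =====
lemma upd_len {nv : Nat} (i : Int) (c : List (List Int)) (t : List Int × List Int × List Bool)
    (j : Nat) (h : pvLenT t nv) : pvLenT (pvUpd i c t j) nv := by
  obtain ⟨ones, last, bad⟩ := t
  obtain ⟨h1, h2, h3⟩ := h
  simp only [pvUpd, pvLenT] at *
  split_ifs <;> simp_all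

lemma upd_getT_self {nv : Nat} (i : Int) (c : List (List Int))
    (t : List Int × List Int × List Bool) (j : Nat) (hj : j < nv) (h : pvLenT t nv) :
    pvGetT (pvUpd i c t j) j = pvStepC i (pvColVal c j) (pvGetT t j) := by
  obtain ⟨ones, last, bad⟩ := t
  obtain ⟨h1, h2, h3⟩ := h
  subst h1
  simp only [pvUpd, pvGetT, pvStepC, pvColVal] at *
  split_ifs <;>
    simp_all [List.getD_eq_getElem?_getD]

lemma upd_getT_ne (i : Int) (c : List (List Int)) (t : List Int × List Int × List Bool)
    (j j' : Nat) (hne : j ≠ j') : pvGetT (pvUpd i c t j') j = pvGetT t j := by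
  obtain ⟨ones, last, bad⟩ := t
  simp only [pvUpd, pvGetT]
  split_ifs <;>
    simp_all [List.getD_eq_getElem?_getD, List.getElem?_set_ne, Ne.symm hne]

lemma foldl_upd_len {nv : Nat} (i : Int) (c : List (List Int)) :
    ∀ (L : List Nat) (t : List Int × List Int × List Bool), pvLenT t nv →
      pvLenT (L.foldl (pvUpd i c) t) nv := by
  intro L
  induction L with
  | nil => intro t h; exact h
  | cons j' L' ih => intro t h; exact ih _ (upd_len i c t j' h)

lemma foldl_upd_getT {nv : Nat} (i : Int) (c : List (List Int)) (j : Nat) (hj : j < nv) :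
    ∀ (L : List Nat) (t : List Int × List Int × List Bool), L.Nodup → pvLenT t nv →
      pvGetT (L.foldl (pvUpd i c) t) j =
        if j ∈ L then pvStepC i (pvColVal c j) (pvGetT t j) else pvGetT t j := by
  intro L
  induction L with
  | nil => intro t _ _; simp
  | cons j' L' ih =>
    intro t hnd hlen
    obtain ⟨hj', hnd'⟩ := List.nodup_cons.mp hnd
    by_cases hjj : j = j'
    · subst hjj
      simp only [List.foldl_cons, List.mem_cons, true_or, if_pos]
      rw [ih _ hnd' (upd_len i c t j hlen), if_neg (by simpa using hj'),
        upd_getT_self i c t j hj hlen]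
    · simp only [List.foldl_cons, List.mem_cons]
      rw [ih _ hnd' (upd_len i c t j' hlen), upd_getT_ne i c t j j' hjj]
      simp [hjj]

lemma pass_getT {nv : Nat} (j : Nat) (hj : j < nv) :
    ∀ (cs : List (List (List Int))) (i0 : Int) (t : List Int × List Int × List Bool),
      pvLenT t nv →
      pvGetT ((PySem.List.enumerate cs i0).foldl
        (fun tabs ic => (List.range nv).foldl (pvUpd ic.1 ic.2) tabs) t) j =
        pvColSum cs j i0 (pvGetT t j) := by
  intro cs
  induction cs with
  | nil => intro i0 t _; simp [PySem.List.enumerate, pvColSum]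
  | cons r rest ih =>
    intro i0 t hlen
    rw [PySem.List.enumerate_cons]
    simp only [List.foldl_cons]
    rw [ih (i0 + 1) _ (foldl_upd_len i0 r _ t hlen), colSum_cons]
    congr 1
    rw [foldl_upd_getT i0 r j hj (List.range nv) t List.nodup_range hlen,
      if_pos (List.mem_range.mpr hj)]

-- the per-column step functions of the two final sweeps agree
lemma step_eq (cs : List (List (List Int))) (j : Nat) (acc : List Int)
    (t : List Int × List Int × List Bool)
    (hT : pvGetT t j = pvColSum cs j 0 (0, -1, false)) :
    (if (pvScanCol cs j 0 0 (-1)).1 = 1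
     then acc.set (pvScanCol cs j 0 0 (-1)).2.toNat (j : Int) else acc) =
    (if t.2.2.getD j false = false ∧ t.1.getD j 0 = 1
     then acc.set (t.2.1.getD j (-1)).toNat (j : Int) else acc) := by
  have e1 : t.1.getD j 0 = (pvColSum cs j 0 (0, -1, false)).1 := congrArg Prod.fst hT
  have e2 : t.2.1.getD j (-1) = (pvColSum cs j 0 (0, -1, false)).2.1 :=
    congrArg (fun p => p.2.1) hT
  have e3 : t.2.2.getD j false = (pvColSum cs j 0 (0, -1, false)).2.2 :=
    congrArg (fun p => p.2.2) hT
  rw [e1, e2, e3]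
  cases hb : (pvColSum cs j 0 (0, -1, false)).2.2 with
  | false =>
    rw [scan_clean cs j 0 0 (-1) hb]
    simp
  | true =>
    rw [if_neg (show ¬((pvScanCol cs j 0 0 (-1)).1 = 1) from by
          rw [scan_bad cs j 0 0 (-1) hb]; decide),
      if_neg (show ¬(true = false ∧ (pvColSum cs j 0 (0, -1, false)).1 = 1) from by simp)]

-- ===== VERDICT (by name: the statement is the Claim_ definition above) =====
theorem find_basis_spec : Claim_equal_find_basis := by
  intro cs _ _
  show find_basis cs = find_basis_alt cs
  unfold find_basis find_basis_alt
  dsimp only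
  refine PySem.List.foldl_congr_mem _ _ _ _ ?_
  intro acc j hjmem
  have hj : j < (if cs ≠ [] then ((cs.headD []).headD []).length else 0) :=
    List.mem_range.mp hjmem
  refine step_eq cs j acc _ ?_
  rw [pass_getT j hj cs 0 _ ⟨by simp, by simp, by simp⟩]
  congr 1
  simp [pvGetT]
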